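-- pv_equiv track=rewrite | github.com/Gilzuk/relaynet2 | fix_qam16_legends.py | assign_styles
-- ===== SOURCE A (Python) =====
-- MARKERS = ["o","s","^","D","v","p","h","X","*","P","<",">","1","2"]
--
-- LSTYLES = ["-","--","-.",":","-","--","-.",":","-","--","-.",":","-","--"]
--
-- BASELINE_STYLE = {
--     "AF": {"color": "#888888", "marker": "<", "ls": ":"},
--     "DF": {"color": "#333333", "marker": ">", "ls": ":"},
-- }
--
-- def assign_styles(labels):
--     """Assign color/marker/linestyle to each label."""
--     colors, markers, lstyles = {}, {}, {}
--     ai_idx = 0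
--     for label in labels:
--         up = label.upper()
--         if up in BASELINE_STYLE:
--             s = BASELINE_STYLE[up]
--             colors[label]  = s["color"]
--             markers[label] = s["marker"]
--             lstyles[label] = s["ls"]
--         else:
--             colors[label]  = PALETTE[ai_idx % len(PALETTE)]
--             markers[label] = MARKERS[ai_idx % len(MARKERS)]
--             lstyles[label] = LSTYLES[ai_idx % len(LSTYLES)]
--             ai_idx += 1
--     return colors, markers, lstyles
--
-- PALETTE = [
--     "#0072B2","#D55E00","#009E73","#E69F00",
--     "#56B4E9","#CC79A7","#F0E442","#882255",
--     "#4B0082","#8B4513","#888888","#333333",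
-- ]
-- ===== SOURCE B (Python) =====
-- MARKERS = ["o","s","^","D","v","p","h","X","*","P","<",">","1","2"]
--
-- LSTYLES = ["-","--","-.",":","-","--","-.",":","-","--","-.",":","-","--"]
--
-- BASELINE_STYLE = {
--     "AF": {"color": "#888888", "marker": "<", "ls": ":"},
--     "DF": {"color": "#333333", "marker": ">", "ls": ":"},
-- }
--
-- PALETTE = [
--     "#0072B2","#D55E00","#009E73","#E69F00",
--     "#56B4E9","#CC79A7","#F0E442","#882255",
--     "#4B0082","#8B4513","#888888","#333333",
-- ]
--
-- def _prefix_nonbase(labels):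
--     """pre[p] = number of non-baseline labels strictly before position p."""
--     pre = []
--     k = 0
--     for lab in labels:
--         pre.append(k)
--         if lab.upper() not in BASELINE_STYLE:
--             k += 1
--     return pre
--
-- def _style(lab, i):
--     """(color, marker, ls) for label lab whose positional rotation index is i."""
--     up = lab.upper()
--     if up in BASELINE_STYLE:
--         s = BASELINE_STYLE[up]
--         return s["color"], s["marker"], s["ls"]
--     return (PALETTE[i % len(PALETTE)],
--             MARKERS[i % len(MARKERS)],
--             LSTYLES[i % len(LSTYLES)])
--
-- def assign_styles(labels):
--     """Assign color/marker/linestyle to each label."""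
--     pre = _prefix_nonbase(labels)
--     colors  = {lab: _style(lab, i)[0] for lab, i in zip(labels, pre)}
--     markers = {lab: _style(lab, i)[1] for lab, i in zip(labels, pre)}
--     lstyles = {lab: _style(lab, i)[2] for lab, i in zip(labels, pre)}
--     return colors, markers, lstyles
-- ===== Notes on version B (the rewrite author's own statement) =====
-- stated objective: alternative
-- what changed: The single stateful loop threading three dicts and a running ai_idx counter is replaced by a prefix-count pass that assigns each position its rotation index, followed by three stateless dict comprehensions over zip(labels, pre).
import Mathlib
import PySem

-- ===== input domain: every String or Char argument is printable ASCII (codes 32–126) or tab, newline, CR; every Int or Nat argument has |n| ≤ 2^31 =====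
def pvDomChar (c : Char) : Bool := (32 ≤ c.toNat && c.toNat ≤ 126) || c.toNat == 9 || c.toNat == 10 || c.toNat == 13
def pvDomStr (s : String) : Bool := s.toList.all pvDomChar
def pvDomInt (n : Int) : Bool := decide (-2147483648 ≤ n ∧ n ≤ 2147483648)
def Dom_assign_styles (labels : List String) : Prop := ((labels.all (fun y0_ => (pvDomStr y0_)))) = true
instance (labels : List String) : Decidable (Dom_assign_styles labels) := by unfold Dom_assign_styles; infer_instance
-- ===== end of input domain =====

-- B replaces A's single stateful loop (three dicts + running counter) by a prefix-count
-- pass plus three stateless dict comprehensions; same return value, similar cost.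

-- module constants (shared by both ports, as in the Python module)
def MARKERS : List String := ["o","s","^","D","v","p","h","X","*","P","<",">","1","2"]
def LSTYLES : List String := ["-","--","-.",":","-","--","-.",":","-","--","-.",":","-","--"]
def BASELINE_STYLE : PySem.Dict String (PySem.Dict String String) :=
  PySem.Dict.mk [("AF", PySem.Dict.mk [("color","#888888"),("marker","<"),("ls",":")]),
                 ("DF", PySem.Dict.mk [("color","#333333"),("marker",">"),("ls",":")])]
def PALETTE : List String :=
  ["#0072B2","#D55E00","#009E73","#E69F00",
   "#56B4E9","#CC79A7","#F0E442","#882255",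
   "#4B0082","#8B4513","#888888","#333333"]

-- ===== PORT A =====
-- loop body of A; dict lookups on the literal BASELINE_STYLE dicts use .getD "" (keys always present)
def stepA (acc : PySem.Dict String String × PySem.Dict String String × PySem.Dict String String × Int)
    (label : String) :
    PySem.Dict String String × PySem.Dict String String × PySem.Dict String String × Int :=
  let (colors, markers, lstyles, ai_idx) := acc
  let up := PySem.Str.upper label
  if BASELINE_STYLE.contains up then
    let s := (BASELINE_STYLE.get? up).getD PySem.Dict.empty
    (colors.insert label ((s.get? "color").getD ""),
     markers.insert label ((s.get? "marker").getD ""),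
     lstyles.insert label ((s.get? "ls").getD ""),
     ai_idx)
  else
    (colors.insert label (PySem.List.pyGetD PALETTE (PySem.Int.mod ai_idx (PALETTE.length : Int)) ""),
     markers.insert label (PySem.List.pyGetD MARKERS (PySem.Int.mod ai_idx (MARKERS.length : Int)) ""),
     lstyles.insert label (PySem.List.pyGetD LSTYLES (PySem.Int.mod ai_idx (LSTYLES.length : Int)) ""),
     ai_idx + 1)

def assign_styles (labels : List String) : (List (String × String)) × (List (String × String)) × (List (String × String)) :=
  let r := labels.foldl stepA (PySem.Dict.empty, PySem.Dict.empty, PySem.Dict.empty, 0)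
  (r.1.items, r.2.1.items, r.2.2.1.items)

-- ===== PORT B =====
-- loop body of B's _prefix_nonbase: 'pre.append(k); if lab.upper() not in BASELINE_STYLE: k += 1'
def preStep (acc : List Int × Int) (lab : String) : List Int × Int :=
  (acc.1 ++ [acc.2],
   if BASELINE_STYLE.contains (PySem.Str.upper lab) then acc.2 else acc.2 + 1)

def prefixNB (labels : List String) : List Int :=
  (labels.foldl preStep ([], 0)).1

-- B's _style(lab, i)
def styleB (lab : String) (i : Int) : String × String × String :=
  let up := PySem.Str.upper lab
  if BASELINE_STYLE.contains up then
    let s := (BASELINE_STYLE.get? up).getD PySem.Dict.empty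
    ((s.get? "color").getD "", (s.get? "marker").getD "", (s.get? "ls").getD "")
  else
    (PySem.List.pyGetD PALETTE (PySem.Int.mod i (PALETTE.length : Int)) "",
     PySem.List.pyGetD MARKERS (PySem.Int.mod i (MARKERS.length : Int)) "",
     PySem.List.pyGetD LSTYLES (PySem.Int.mod i (LSTYLES.length : Int)) "")

-- one dict comprehension '{lab: pick(_style(lab, i)) for lab, i in zip(labels, pre)}'
def foldB (labels : List String) (pick : String × String × String → String) : PySem.Dict String String :=
  (labels.zip (prefixNB labels)).foldl
    (fun d q => d.insert q.1 (pick (styleB q.1 q.2))) PySem.Dict.empty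

def assign_styles_alt (labels : List String) : (List (String × String)) × (List (String × String)) × (List (String × String)) :=
  ((foldB labels (fun t => t.1)).items,
   (foldB labels (fun t => t.2.1)).items,
   (foldB labels (fun t => t.2.2)).items)

-- ===== PRECONDITION & SPEC =====
def Spec_assign_styles (labels : List String) (out : (List (String × String)) × (List (String × String)) × (List (String × String))) : Prop := out = assign_styles_alt labels
instance (labels : List String) (out : (List (String × String)) × (List (String × String)) × (List (String × String))) : Decidable (Spec_assign_styles labels out) := by unfold Spec_assign_styles; infer_instance

-- ===== CLAIM (what is proved, stated in full; the proofs are below) =====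
def Claim_equal_assign_styles : Prop := ∀ (labels : List String), Dom_assign_styles labels → Spec_assign_styles labels (assign_styles labels)

-- ===== LEMMAS AND PROOFS =====

def nbP (q : String) : Bool := !(BASELINE_STYLE.contains (PySem.Str.upper q))

lemma preStep_fst (s : List Int × Int) (x : String) : (preStep s x).1 = s.1 ++ [s.2] := rfl

lemma preStep_snd (s : List Int × Int) (x : String) :
    (preStep s x).2 = if BASELINE_STYLE.contains (PySem.Str.upper x) then s.2 else s.2 + 1 := rfl

lemma snd_preFold (L : List String) :
    (L.foldl preStep ([], 0)).2 = ((L.countP nbP : Nat) : Int) := by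
  induction L using List.reverseRecOn with
  | nil => rfl
  | append_singleton L x ih =>
    rw [List.foldl_append, List.foldl_cons, List.foldl_nil, preStep_snd, ih]
    by_cases hb : BASELINE_STYLE.contains (PySem.Str.upper x) = true
    · have hnb : nbP x = false := by simp [nbP, hb]
      simp [hb, List.countP_append, hnb]
    · have hnb : nbP x = true := by simp [nbP, hb]
      simp [hb, List.countP_append, hnb]

lemma prefixNB_append (L : List String) (x : String) :
    prefixNB (L ++ [x]) = prefixNB L ++ [((L.countP nbP : Nat) : Int)] := by
  unfold prefixNB
  rw [List.foldl_append, List.foldl_cons, List.foldl_nil, preStep_fst, snd_preFold]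

lemma length_prefixNB (L : List String) : (prefixNB L).length = L.length := by
  induction L using List.reverseRecOn with
  | nil => rfl
  | append_singleton L x ih => rw [prefixNB_append]; simp [ih]

lemma foldB_append (L : List String) (x : String) (pick : String × String × String → String) :
    foldB (L ++ [x]) pick
      = (foldB L pick).insert x (pick (styleB x ((L.countP nbP : Nat) : Int))) := by
  unfold foldB
  rw [prefixNB_append, List.zip_append (length_prefixNB L).symm, List.foldl_append]
  rfl

lemma fold_eq (L : List String) :
    L.foldl stepA (PySem.Dict.empty, PySem.Dict.empty, PySem.Dict.empty, 0)
      = (foldB L (fun t => t.1), foldB L (fun t => t.2.1), foldB L (fun t => t.2.2),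
         ((L.countP nbP : Nat) : Int)) := by
  induction L using List.reverseRecOn with
  | nil => rfl
  | append_singleton L x ih =>
    rw [List.foldl_append, ih, List.foldl_cons, List.foldl_nil]
    rw [foldB_append, foldB_append, foldB_append]
    unfold stepA styleB
    by_cases hb : BASELINE_STYLE.contains (PySem.Str.upper x) = true
    · have hnb : nbP x = false := by simp [nbP, hb]
      simp [hb, List.countP_append, hnb]
    · have hnb : nbP x = true := by simp [nbP, hb]
      simp [hb, List.countP_append, hnb]

-- ===== VERDICT (by name: the statement is the Claim_ definition above) =====
theorem assign_styles_spec : Claim_equal_assign_styles := by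
  intro labels _
  unfold Spec_assign_styles assign_styles assign_styles_alt
  rw [fold_eq]
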